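-- pv_equiv track=rewrite | github.com/lininghuhu/PyMIMOX | PyMIMOX.py | delrepeat
-- ===== SOURCE A (Python) =====
-- def delrepeat(List):
-- 	news_ids1 = []
-- 	news_ids2 = []
-- 	i = 0
-- 	for id in List:
-- 		if id not in news_ids1:
-- 			news_ids1.append(id)
-- 			news_ids2.append(i)
-- 			i +=1
-- 		else:
-- 			i +=1
-- 	return news_ids2
-- ===== SOURCE B (Python) =====
-- def delrepeat(List):
-- 	first = {}
-- 	for i, v in reversed(list(enumerate(List))):
-- 		first[v] = i
-- 	return sorted(first.values())
-- ===== Notes on version B (the rewrite author's own statement) =====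
-- stated objective: faster
-- what changed: Replaced A's quadratic seen-list scan with a reverse pass that overwrites a dict entry value->index (so the last write is the first occurrence, no membership test at all) followed by sorting the dict's values.
import Mathlib
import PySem

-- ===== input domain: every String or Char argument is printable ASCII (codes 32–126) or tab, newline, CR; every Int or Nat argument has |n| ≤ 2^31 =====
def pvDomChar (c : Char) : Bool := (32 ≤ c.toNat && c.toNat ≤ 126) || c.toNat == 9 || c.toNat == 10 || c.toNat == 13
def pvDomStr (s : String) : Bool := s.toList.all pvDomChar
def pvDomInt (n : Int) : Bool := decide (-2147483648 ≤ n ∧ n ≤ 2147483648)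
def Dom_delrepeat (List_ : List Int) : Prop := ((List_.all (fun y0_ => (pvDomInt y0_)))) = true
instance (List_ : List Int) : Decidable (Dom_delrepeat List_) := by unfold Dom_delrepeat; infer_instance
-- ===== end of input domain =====

-- B replaces A's seen-list membership scan by a reverse pass overwriting a dict value->index
-- (last write = first occurrence) and a final sort of the dict's values (faster: hash map + sort
-- instead of a linear scan per element).

-- ===== PORT A =====
-- A's loop: seen = news_ids1, out = news_ids2, i the running counter (incremented in both branches).
def delrepeatLoop (seen out : List Int) (i : Int) : List Int → List Int
  | [] => out
  | x :: rest =>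
      if x ∈ seen then delrepeatLoop seen out (i + 1) rest
      else delrepeatLoop (seen ++ [x]) (out ++ [i]) (i + 1) rest

def delrepeat (List_ : List Int) : List Int :=
  delrepeatLoop [] [] 0 List_

-- ===== PORT B =====
-- first = {}; for i, v in reversed(list(enumerate(List))): first[v] = i; return sorted(first.values())
def delrepeat_alt (List_ : List Int) : List Int :=
  let first := (PySem.List.enumerate List_ 0).reverse.foldl
      (fun d p => d.insert p.2 p.1) (PySem.Dict.empty : PySem.Dict Int Int)
  PySem.List.sorted first.values (fun x => x) false

-- ===== PRECONDITION & SPEC =====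
def Spec_delrepeat (List_ : List Int) (out : List Int) : Prop := out = delrepeat_alt List_
instance (List_ : List Int) (out : List Int) : Decidable (Spec_delrepeat List_ out) := by unfold Spec_delrepeat; infer_instance

-- ===== CLAIM (what is proved, stated in full; the proofs are below) =====
def Claim_equal_delrepeat : Prop := ∀ (List_ : List Int), Dom_delrepeat List_ → Spec_delrepeat List_ (delrepeat List_)

-- ===== LEMMAS AND PROOFS =====

-- the reference value: indices i with index?(L, L[i]) = i, in increasing order
def firstIdxs (L : List Int) : List Int :=
  ((PySem.List.enumerate L 0).filter
      (fun p => (PySem.List.index? L p.2).map Int.ofNat == some p.1)).map (·.1)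

-- A computes firstIdxs (generalized over an already-consumed prefix)
theorem delrepeat_main (rest : List Int) :
    ∀ (pre seen out : List Int), (∀ a, a ∈ seen ↔ a ∈ pre) →
    delrepeatLoop seen out (pre.length : Int) rest
      = out ++ ((PySem.List.enumerate rest (pre.length : Int)).filter
          (fun p => (PySem.List.index? (pre ++ rest) p.2).map Int.ofNat == some p.1)).map (·.1) := by
  induction rest with
  | nil =>
      intro pre seen out _
      simp [delrepeatLoop, PySem.List.enumerate_nil]
  | cons x rs ih =>
      intro pre seen out hmem
      rw [PySem.List.enumerate_cons]
      by_cases hx : x ∈ pre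
      · -- duplicate: A skips, the filter drops the head
        have hidx : PySem.List.index? (pre ++ x :: rs) x = PySem.List.index? pre x :=
          PySem.List.index?_append_of_mem _ hx
        obtain ⟨k, hk⟩ := (PySem.List.index?_isSome_iff (xs := pre) (v := x)).2 hx
            |> fun h => Option.isSome_iff_exists.1 h
        have hklt : k < pre.length := by
          obtain ⟨hlt, _, _⟩ := PySem.List.getElem_of_index?_eq_some hk
          exact hlt
        have hcond : ((PySem.List.index? (pre ++ x :: rs) x).map Int.ofNat
            == some (pre.length : Int)) = false := by
          rw [hidx, hk]
          simp only [Option.map_some, beq_eq_false_iff_ne, ne_eq, Option.some.injEq]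
          intro h
          have : (k : Int) = Int.ofNat k := rfl
          omega
        rw [List.filter_cons]
        simp only [hcond]
        have hseen : x ∈ seen := (hmem x).2 hx
        have heq : delrepeatLoop seen out ((pre.length : Int) + 1) rs
            = delrepeatLoop seen out (((pre ++ [x]).length : Int)) rs := by
          simp
        rw [delrepeatLoop, if_pos hseen, heq,
            ih (pre ++ [x]) seen out (fun a => by
              rw [hmem a]; simp [List.mem_append]
              intro ha; subst ha; exact hx)]
        have : (pre ++ [x]) ++ rs = pre ++ x :: rs := by simp
        rw [this]
        congr 2
        simp
      · -- first occurrence: A appends i, the filter keeps the head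
        have hidx : PySem.List.index? (pre ++ x :: rs) x = some pre.length := by
          rw [PySem.List.index?_eq_some_iff]
          exact ⟨pre, rs, rfl, rfl, hx⟩
        have hcond : ((PySem.List.index? (pre ++ x :: rs) x).map Int.ofNat
            == some (pre.length : Int)) = true := by
          rw [hidx]; simp
        rw [List.filter_cons]
        simp only [hcond, if_true]
        have hseen : x ∉ seen := fun h => hx ((hmem x).1 h)
        have heq : delrepeatLoop (seen ++ [x]) (out ++ [(pre.length : Int)]) ((pre.length : Int) + 1) rs
            = delrepeatLoop (seen ++ [x]) (out ++ [(pre.length : Int)]) (((pre ++ [x]).length : Int)) rs := by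
          simp
        rw [delrepeatLoop, if_neg hseen, heq,
            ih (pre ++ [x]) (seen ++ [x]) (out ++ [(pre.length : Int)]) (fun a => by
              simp [List.mem_append, hmem a])]
        have h2 : (pre ++ [x]) ++ rs = pre ++ x :: rs := by simp
        rw [h2]
        have h3 : ((pre ++ [x]).length : Int) = (pre.length : Int) + 1 := by simp
        rw [h3, List.map_cons, List.append_assoc]
        rfl

theorem delrepeat_eq_firstIdxs (L : List Int) : delrepeat L = firstIdxs L := by
  unfold delrepeat firstIdxs
  have := delrepeat_main L [] [] [] (by simp)
  simpa using this

-- find? over an enumerate is index?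
theorem enum_find? (L : List Int) (s : Int) (v : Int) :
    (PySem.List.enumerate L s).find? (fun p => p.2 == v)
      = (PySem.List.index? L v).map (fun n => (s + (n : Int), v)) := by
  induction L generalizing s with
  | nil => simp [PySem.List.enumerate_nil]
  | cons x rs ih =>
      rw [PySem.List.enumerate_cons, List.find?_cons]
      by_cases hx : x = v
      · subst hx
        rw [PySem.List.index?_cons_self]
        simp
      · have hb : (x == v) = false := by simpa using hx
        simp only [hb]
        rw [ih (s + 1), PySem.List.index?_cons_of_ne rs hx]
        cases PySem.List.index? rs v with
        | none => rfl
        | some n => simp; omega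

-- last-write-wins lookup for the insert loop
theorem get?_insert_fold (l : List (Int × Int)) (d : PySem.Dict Int Int) (k : Int) :
    (l.foldl (fun d p => d.insert p.2 p.1) d).get? k
      = match l.reverse.find? (fun p => p.2 == k) with
        | some p => some p.1
        | none => d.get? k := by
  induction l generalizing d with
  | nil => simp
  | cons p l ih =>
      rw [List.foldl_cons, ih, List.reverse_cons, List.find?_append]
      cases hf : l.reverse.find? (fun q => q.2 == k) with
      | some q => simp
      | none =>
          simp only [Option.none_or]
          by_cases hk : p.2 = k
          · have hb : (p.2 == k) = true := by simpa using hk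
            simp only [List.find?_cons, hb]
            rw [PySem.Dict.get?_insert]
            simp [hk.symm]
          · have hb : (p.2 == k) = false := by simpa using hk
            simp only [List.find?_cons, hb]
            rw [PySem.Dict.get?_insert, if_neg (fun h => hk h.symm)]
            rfl

-- the dict B builds (proof-side name for the fold in delrepeat_alt)
def bDict (L : List Int) : PySem.Dict Int Int :=
  (PySem.List.enumerate L 0).reverse.foldl
      (fun d p => d.insert p.2 p.1) (PySem.Dict.empty : PySem.Dict Int Int)

theorem bDict_get? (L : List Int) (v : Int) :
    (bDict L).get? v = (PySem.List.index? L v).map (fun n => (n : Int)) := by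
  unfold bDict
  rw [get?_insert_fold, List.reverse_reverse, enum_find? L 0 v]
  cases PySem.List.index? L v with
  | none => simp [PySem.Dict.get?_empty]
  | some n => simp

theorem bDict_keys (L : List Int) :
    (bDict L).keys = PySem.Set.ofList L.reverse := by
  unfold bDict
  rw [PySem.Dict.keys_foldl_insert_key ((PySem.List.enumerate L 0).reverse)
        (fun p => p.2) (fun _ p => p.1)]
  rw [List.map_reverse, PySem.List.map_snd_enumerate]
  simp [PySem.Dict.keys_empty, PySem.Set.update, PySem.Set.ofList_eq_foldl]

theorem bDict_nodup_keys (L : List Int) : (bDict L).keys.Nodup := by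
  rw [bDict_keys]
  exact PySem.Set.nodup_ofList _

theorem bDict_values (L : List Int) :
    (bDict L).values = (PySem.Set.ofList L.reverse).map
      (fun v => ((PySem.List.index? L v).map (fun n => (n : Int))).getD 0) := by
  rw [PySem.Dict.values_eq_map_keys (bDict L) (bDict_nodup_keys L) 0, bDict_keys]
  refine List.map_congr_left (fun v hv => ?_)
  rw [PySem.Dict.getD_eq_get?_getD, bDict_get? L v]

theorem mem_firstIdxs (L : List Int) (j : Int) :
    j ∈ firstIdxs L ↔ ∃ v, (PySem.List.index? L v).map (fun n => (n : Int)) = some j := by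
  unfold firstIdxs
  constructor
  · intro hj
    obtain ⟨p, hp, rfl⟩ := List.mem_map.1 hj
    obtain ⟨hpmem, hcond⟩ := List.mem_filter.1 hp
    obtain ⟨a, ha, hcast⟩ :=
      (by simpa using hcond : ∃ a, List.idxOf? p.2 L = some a ∧ (a : Int) = p.1)
    exact ⟨p.2, by rw [PySem.List.index?_eq_idxOf?, ha]; simpa using hcast⟩
  · rintro ⟨v, hv⟩
    cases h : PySem.List.index? L v with
    | none => rw [h] at hv; simp at hv
    | some n =>
        rw [h] at hv
        obtain ⟨hlt, hget, _⟩ := PySem.List.getElem_of_index?_eq_some h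
        have hmem : ((n : Int), v) ∈ PySem.List.enumerate L 0 := by
          rw [PySem.List.mem_enumerate_iff]
          exact ⟨n, hlt, by simp [hget]⟩
        have hj : j = (n : Int) := by simpa using hv.symm
        subst hj
        have h' : List.idxOf? v L = some n := by
          rw [← PySem.List.index?_eq_idxOf?]; exact h
        refine List.mem_map.2 ⟨((n : Int), v), List.mem_filter.2 ⟨hmem, ?_⟩, rfl⟩
        simp [h']

theorem mem_bDict_values (L : List Int) (j : Int) :
    j ∈ (bDict L).values ↔ ∃ v, (PySem.List.index? L v).map (fun n => (n : Int)) = some j := by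
  rw [bDict_values]
  constructor
  · intro hj
    obtain ⟨v, hv, rfl⟩ := List.mem_map.1 hj
    have hvL : v ∈ L := by
      have := (PySem.Set.mem_ofList _ _).1 hv
      simpa using this
    obtain ⟨n, hn⟩ := Option.isSome_iff_exists.1 ((PySem.List.index?_isSome_iff _ _).2 hvL)
    exact ⟨v, by rw [hn]; simp⟩
  · rintro ⟨v, hv⟩
    cases h : PySem.List.index? L v with
    | none => rw [h] at hv; simp at hv
    | some n =>
        rw [h] at hv
        have hvL : v ∈ L := (PySem.List.index?_isSome_iff _ _).1 (by rw [h]; rfl)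
        refine List.mem_map.2 ⟨v, (PySem.Set.mem_ofList _ _).2 (by simpa using hvL), ?_⟩
        rw [h]
        simpa using hv

theorem nodup_bDict_values (L : List Int) : (bDict L).values.Nodup := by
  rw [bDict_values]
  refine List.Nodup.map_on ?_ (PySem.Set.nodup_ofList _)
  intro v1 h1 v2 h2 heq
  have hv1 : v1 ∈ L := by have := (PySem.Set.mem_ofList _ _).1 h1; simpa using this
  have hv2 : v2 ∈ L := by have := (PySem.Set.mem_ofList _ _).1 h2; simpa using this
  obtain ⟨n1, hn1⟩ := Option.isSome_iff_exists.1 ((PySem.List.index?_isSome_iff _ _).2 hv1)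
  obtain ⟨n2, hn2⟩ := Option.isSome_iff_exists.1 ((PySem.List.index?_isSome_iff _ _).2 hv2)
  rw [hn1, hn2] at heq
  simp at heq
  obtain ⟨hlt1, hget1, _⟩ := PySem.List.getElem_of_index?_eq_some hn1
  obtain ⟨hlt2, hget2, _⟩ := PySem.List.getElem_of_index?_eq_some hn2
  subst heq
  rw [← hget1, ← hget2]

theorem pairwise_firstIdxs (L : List Int) : (firstIdxs L).Pairwise (· < ·) := by
  unfold firstIdxs
  refine List.pairwise_map.2 ?_
  exact ((PySem.List.pairwise_lt_enumerate L 0).sublist List.filter_sublist)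

theorem nodup_firstIdxs (L : List Int) : (firstIdxs L).Nodup :=
  (pairwise_firstIdxs L).imp (fun h => ne_of_lt h)

-- ===== VERDICT (by name: the statement is the Claim_ definition above) =====
theorem delrepeat_spec : Claim_equal_delrepeat := by
  intro L _
  unfold Spec_delrepeat
  rw [delrepeat_eq_firstIdxs]
  show firstIdxs L = PySem.List.sorted (bDict L).values (fun x => x) false
  refine (PySem.List.sorted_eq_of_perm_of_pairwise_lt _ _ _ ?_ ?_).symm
  · exact (List.perm_ext_iff_of_nodup (nodup_firstIdxs L) (nodup_bDict_values L)).2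
      (fun j => by rw [mem_firstIdxs, mem_bDict_values])
  · exact pairwise_firstIdxs L
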